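-- pv_equiv track=rewrite | github.com/KhronosGroup/OpenXR-Hpp | scripts/cpp_generator.py | _block_comment
-- ===== SOURCE A (Python) =====
-- SINGLE_LINE_COMMENT_STARTS = ('///', '//!', '//')
--
-- def _block_comment(s, doxygen=False):
--     def clean_line(line):
--         line = line.rstrip()
--         ls = line.lstrip()
--         for prefix in SINGLE_LINE_COMMENT_STARTS:
--
--             if ls.startswith(prefix):
--                 line = ls[len(prefix):]
--                 if line.startswith(' '):
--                     line = line[1:]
--                 break
--         return line
--
--     lines = [clean_line(line).rstrip() for line in s.split('\n') if line]
--
--     # Remove leading and trailing empty lines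
--     while lines and not lines[-1]:
--         lines.pop()
--     while lines and not lines[0]:
--         lines.pop(0)
--
--     # if a line is a second+ consecutive blank line,
--     # then both that line, and the preceding one (lined up with zip)
--     # will be false-ish.
--     lines = [line
--              for prev, line in zip([""] + lines, lines)
--              if prev or line]
--     # Prepend the *
--     lines = [' * ' + line for line in lines]
--     lines.insert(0, "/*!" if doxygen else "/*")
--     lines.append(' */')
--     lines.append('')
--     return '\n'.join(lines)
-- ===== SOURCE B (Python) =====
-- SINGLE_LINE_COMMENT_STARTS = ('///', '//!', '//')
--
-- def _block_comment(s, doxygen=False):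
--     # single pass: clean each line, collapse blank runs, drop leading/trailing
--     # blanks, and prefix ' * ' in one stateful traversal
--     parts = ["/*!" if doxygen else "/*"]
--     started = False
--     pending_blank = False
--     for raw in s.split('\n'):
--         if not raw:
--             continue
--         line = raw.rstrip()
--         ls = line.lstrip()
--         for prefix in SINGLE_LINE_COMMENT_STARTS:
--             if ls.startswith(prefix):
--                 line = ls[len(prefix):]
--                 if line.startswith(' '):
--                     line = line[1:]
--                 break
--         if not line:
--             pending_blank = True
--             continue
--         if started and pending_blank:
--             parts.append(' * ')
--         pending_blank = False
--         started = True
--         parts.append(' * ' + line)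
--     parts.append(' */')
--     parts.append('')
--     return '\n'.join(parts)
-- ===== Notes on version B (the rewrite author's own statement) =====
-- stated objective: simpler
-- what changed: A cleans, trims leading/trailing blanks (two while-pop loops), collapses blank runs via a zip-with-shifted-copy comprehension and prefixes in four separate passes; B is one stateful loop over the lines with a started/pending_blank state that emits each output line directly.
import Mathlib
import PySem

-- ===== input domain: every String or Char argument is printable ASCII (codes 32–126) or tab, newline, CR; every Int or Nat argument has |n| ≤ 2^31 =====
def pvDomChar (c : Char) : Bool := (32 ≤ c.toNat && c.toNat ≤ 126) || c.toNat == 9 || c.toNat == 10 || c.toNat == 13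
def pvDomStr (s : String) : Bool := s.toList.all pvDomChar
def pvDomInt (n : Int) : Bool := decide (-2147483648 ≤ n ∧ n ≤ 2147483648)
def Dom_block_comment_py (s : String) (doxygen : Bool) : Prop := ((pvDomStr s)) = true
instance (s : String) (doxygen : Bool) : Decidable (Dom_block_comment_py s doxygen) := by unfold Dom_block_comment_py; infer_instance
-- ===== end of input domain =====

-- B fuses A's four list passes (clean+filter, two trim loops, zip-collapse, prefix map)
-- into one stateful traversal; objective: simpler single-pass decomposition, same values.


-- ===== PORT A =====
-- clean_line helper of A
def pyCleanLine (line0 : String) : String :=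
  let line := PySem.Str.rstrip line0
  let ls := PySem.Str.lstrip line
  if PySem.Str.startswith ls "///" then
    let r := PySem.Str.slice ls (some 3) none
    if PySem.Str.startswith r " " then PySem.Str.slice r (some 1) none else r
  else if PySem.Str.startswith ls "//!" then
    let r := PySem.Str.slice ls (some 3) none
    if PySem.Str.startswith r " " then PySem.Str.slice r (some 1) none else r
  else if PySem.Str.startswith ls "//" then
    let r := PySem.Str.slice ls (some 2) none
    if PySem.Str.startswith r " " then PySem.Str.slice r (some 1) none else r
  else line

def block_comment_py (s : String) (doxygen : Bool) : String :=
  let lines1 := ((PySem.Str.split? s "\n").getD []).filterMap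
    (fun line => if line ≠ "" then some (PySem.Str.rstrip (pyCleanLine line)) else none)
  -- while lines and not lines[-1]: lines.pop()
  let lines2 := (lines1.reverse.dropWhile (fun l => l == "")).reverse
  -- while lines and not lines[0]: lines.pop(0)
  let lines3 := lines2.dropWhile (fun l => l == "")
  let lines4 := (("" :: lines3).zip lines3).filterMap
    (fun pl => if pl.1 ≠ "" ∨ pl.2 ≠ "" then some pl.2 else none)
  let lines5 := lines4.map (fun line => " * " ++ line)
  PySem.Str.join "\n" (((if doxygen then "/*!" else "/*") :: lines5) ++ [" */", ""])

-- ===== PORT B =====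
-- B inlines the same cleaning steps in its loop; the shared helper pyCleanLine is reused
-- B's single for-loop, state = (parts, started, pending_blank)
def bLoop : List String → List String → Bool → Bool → List String
  | [], parts, _, _ => parts
  | raw :: rest, parts, started, pending =>
    if raw = "" then bLoop rest parts started pending
    else
      let line := pyCleanLine raw
      if line = "" then bLoop rest parts started true
      else bLoop rest ((parts ++ (if started && pending then [" * "] else [])) ++ [" * " ++ line]) true false

def block_comment_py_alt (s : String) (doxygen : Bool) : String :=
  let parts := bLoop ((PySem.Str.split? s "\n").getD []) [if doxygen then "/*!" else "/*"] false false
  PySem.Str.join "\n" (parts ++ [" */", ""])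

-- ===== PRECONDITION & SPEC =====
def Spec_block_comment_py (s : String) (doxygen : Bool) (out : String) : Prop := out = block_comment_py_alt s doxygen
instance (s : String) (doxygen : Bool) (out : String) : Decidable (Spec_block_comment_py s doxygen out) := by unfold Spec_block_comment_py; infer_instance

-- ===== CLAIM (what is proved, stated in full; the proofs are below) =====
def Claim_equal_block_comment_py : Prop := ∀ (s : String) (doxygen : Bool), Dom_block_comment_py s doxygen → Spec_block_comment_py s doxygen (block_comment_py s doxygen)

-- ===== LEMMAS AND PROOFS =====

-- no-trailing-whitespace invariant used to discharge A's redundant second rstrip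
lemma nt_take {p : Char → Bool} {l : List Char} (h : l.dropWhile p = l) (n : Nat) :
    (l.take n).dropWhile p = l.take n := by
  rw [List.dropWhile_eq_self_iff] at h ⊢
  intro hl
  have hl' : 0 < l.length := lt_of_lt_of_le hl (by simp [List.length_take])
  simpa [List.getElem_take] using h hl'

lemma nt_rstrip (cs : List Char) : PySem.Chars.rstrip (PySem.Chars.rstrip cs) = PySem.Chars.rstrip cs := by
  simp [PySem.Chars.rstrip, List.dropWhile_idempotent]

lemma nt_suffix {x y : List Char} (h : PySem.Chars.rstrip x = x) (hs : y <:+ x) :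
    PySem.Chars.rstrip y = y := by
  have hx : List.dropWhile PySem.Chars.isspace x.reverse = x.reverse := by
    have := congrArg List.reverse h
    simpa [PySem.Chars.rstrip] using this
  have hp : y.reverse <+: x.reverse := List.reverse_prefix.mpr hs
  have hy : y.reverse = x.reverse.take y.reverse.length := List.prefix_iff_eq_take.mp hp
  have : List.dropWhile PySem.Chars.isspace y.reverse = y.reverse := by
    rw [hy]; exact nt_take hx _
  have := congrArg List.reverse this
  simpa [PySem.Chars.rstrip] using this

lemma slice_suffix (s : String) (k : Int) (hk : 0 ≤ k) :
    (PySem.Str.slice s (some k) none).toList <:+ s.toList := by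
  rw [PySem.Str.toList_slice, PySem.Chars.slice_eq_listSlice, PySem.List.slice_from _ hk]
  exact List.drop_suffix _ _

lemma clean_rstrip (l : String) : PySem.Str.rstrip (pyCleanLine l) = pyCleanLine l := by
  have hnt : PySem.Chars.rstrip (PySem.Str.rstrip l).toList = (PySem.Str.rstrip l).toList := by
    rw [PySem.Str.toList_rstrip]; exact nt_rstrip _
  have hfix : ∀ res : String, res.toList <:+ (PySem.Str.rstrip l).toList →
      PySem.Str.rstrip res = res := by
    intro res hs
    have h2 := nt_suffix hnt hs
    have h3 : PySem.Str.rstrip res = String.ofList (PySem.Chars.rstrip res.toList) := rfl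
    rw [h3, h2, String.ofList_toList]
  have hls : (PySem.Str.lstrip (PySem.Str.rstrip l)).toList <:+ (PySem.Str.rstrip l).toList := by
    rw [PySem.Str.toList_lstrip]; exact List.dropWhile_suffix _
  have hsl : ∀ (k : Int), 0 ≤ k →
      (PySem.Str.slice (PySem.Str.lstrip (PySem.Str.rstrip l)) (some k) none).toList <:+ (PySem.Str.rstrip l).toList :=
    fun k hk => (slice_suffix _ k hk).trans hls
  have hsl2 : ∀ (k j : Int), 0 ≤ k → 0 ≤ j →
      (PySem.Str.slice (PySem.Str.slice (PySem.Str.lstrip (PySem.Str.rstrip l)) (some k) none) (some j) none).toList <:+ (PySem.Str.rstrip l).toList :=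
    fun k j hk hj => (slice_suffix _ j hj).trans (hsl k hk)
  unfold pyCleanLine
  dsimp only
  split_ifs with h1 h2 h3 h4 h5 h6
  · exact hfix _ (hsl2 3 1 (by norm_num) (by norm_num))
  · exact hfix _ (hsl 3 (by norm_num))
  · exact hfix _ (hsl2 3 1 (by norm_num) (by norm_num))
  · exact hfix _ (hsl 3 (by norm_num))
  · exact hfix _ (hsl2 2 1 (by norm_num) (by norm_num))
  · exact hfix _ (hsl 2 (by norm_num))
  · exact hfix _ (List.suffix_refl _)



-- proof-side vocabulary: the cleaned kept lines, trailing-blank trim, and the two collapses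
def pvF (t : List String) : List String :=
  t.filterMap (fun r => if r = "" then none else some (pyCleanLine r))

def pvPT (l : List String) : List String := (l.reverse.dropWhile (fun x => x == "")).reverse

def pvCzip : String → List String → List String
  | _, [] => []
  | prev, l :: t => (if prev ≠ "" ∨ l ≠ "" then [l] else []) ++ pvCzip l t

def pvColl : Bool → List String → List String
  | _, [] => []
  | pb, l :: t => if l = "" then pvColl true t else (if pb then [""] else []) ++ l :: pvColl false t

lemma pvPT_cons (x : String) (t : List String) :
    pvPT (x :: t) = if x = "" ∧ pvPT t = [] then [] else x :: pvPT t := by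
  unfold pvPT
  rw [List.reverse_cons, List.dropWhile_append]
  by_cases h : List.dropWhile (fun x => x == "") t.reverse = []
  · by_cases hx : x = ""
    · simp [h, List.dropWhile, hx]
    · have hb : (x == "") = false := by simp [hx]
      simp [h, List.dropWhile, hx, hb]
  · simp [h, List.isEmpty_iff]

lemma pvPT_noTrail (t : List String) : (pvPT t).getLast? ≠ some "" := by
  induction t with
  | nil => simp [pvPT]
  | cons x t ih =>
    rw [pvPT_cons]
    split_ifs with h
    · simp
    · rcases Decidable.em (pvPT t = []) with he | he
      · have hx : x ≠ "" := fun hx => h ⟨hx, he⟩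
        simp [he, hx]
      · cases hpt : pvPT t with
        | nil => exact absurd hpt he
        | cons b t' =>
          have hgl : (x :: b :: t').getLast? = (b :: t').getLast? := by simp
          rw [hgl, ← hpt]; exact ih

lemma czip_zip (M : List String) : ∀ prev,
    ((prev :: M).zip M).filterMap (fun pl => if pl.1 ≠ "" ∨ pl.2 ≠ "" then some pl.2 else none)
      = pvCzip prev M := by
  induction M with
  | nil => intro prev; simp [pvCzip]
  | cons l t ih =>
    intro prev
    rw [show (prev :: l :: t).zip (l :: t) = (prev, l) :: (l :: t).zip t from rfl]
    rw [List.filterMap_cons, pvCzip]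
    split_ifs with h
    · rw [ih]; rfl
    · rw [ih]; rfl

lemma czip_dropWhile (M : List String) :
    pvCzip "" (M.dropWhile (fun x => x == "")) = pvCzip "" M := by
  induction M with
  | nil => rfl
  | cons l t ih =>
    by_cases h : l = ""
    · subst h
      rw [show List.dropWhile (fun x => x == "") ("" :: t) = List.dropWhile (fun x => x == "") t from rfl]
      rw [ih, pvCzip]
      simp
    · have hb : (l == "") = false := by simp [h]
      simp [List.dropWhile, hb]

lemma czip_coll (M : List String) (h : M.getLast? ≠ some "") :
    (∀ prev, prev ≠ "" → pvCzip prev M = pvColl false M) ∧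
    (M ≠ [] → "" :: pvCzip "" M = pvColl true M) := by
  induction M with
  | nil => exact ⟨fun _ _ => rfl, fun hne => absurd rfl hne⟩
  | cons l t ih =>
    have ht : t.getLast? ≠ some "" := by
      cases t with
      | nil => simp
      | cons b t' => simpa using h
    obtain ⟨ih1, ih2⟩ := ih ht
    constructor
    · intro prev hprev
      by_cases hl : l = ""
      · subst hl
        have htne : t ≠ [] := by rintro rfl; simp at h
        rw [pvCzip, pvColl]
        simp only [if_pos rfl]
        simp only [hprev, ne_eq, not_false_iff, true_or, if_pos]
        rw [← ih2 htne]
        rfl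
      · rw [pvCzip, pvColl]
        simp [hl, hprev, ih1 l hl]
    · intro _
      by_cases hl : l = ""
      · subst hl
        have htne : t ≠ [] := by rintro rfl; simp at h
        rw [pvCzip, pvColl]
        simp only [if_pos rfl]
        rw [← ih2 htne]
        simp
      · rw [pvCzip, pvColl]
        simp [hl, ih1 l hl]

lemma bLoop_acc (rest : List String) : ∀ parts started pending,
    bLoop rest parts started pending = parts ++ bLoop rest [] started pending := by
  induction rest with
  | nil => intro parts st pd; simp [bLoop]
  | cons raw t ih =>
    intro parts st pd
    rw [bLoop, bLoop]
    dsimp only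
    by_cases h : raw = ""
    · rw [if_pos h, if_pos h, ih parts, ih []]
    · rw [if_neg h, if_neg h]
      by_cases hc : pyCleanLine raw = ""
      · rw [if_pos hc, if_pos hc, ih parts, ih []]
      · rw [if_neg hc, if_neg hc, ih, ih (([] ++ _) ++ _)]
        simp

lemma bLoop_true (t : List String) : ∀ p : Bool,
    bLoop t [] true p = (pvColl p (pvPT (pvF t))).map (fun l => " * " ++ l) := by
  induction t with
  | nil => intro p; simp [bLoop, pvF, pvPT, pvColl]
  | cons raw t ih =>
    intro p
    rw [bLoop]
    dsimp only
    by_cases h : raw = ""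
    · rw [if_pos h, show pvF (raw :: t) = pvF t by simp [pvF, h]]
      exact ih p
    · rw [if_neg h, show pvF (raw :: t) = pyCleanLine raw :: pvF t by simp [pvF, h]]
      by_cases hc : pyCleanLine raw = ""
      · rw [if_pos hc, hc, pvPT_cons, ih true]
        by_cases he : pvPT (pvF t) = []
        · rw [if_pos ⟨rfl, he⟩, he]
          cases p <;> rfl
        · rw [if_neg (by simp [he])]
          rw [show pvColl p ("" :: pvPT (pvF t)) = pvColl true (pvPT (pvF t)) by rw [pvColl]; simp]
      · rw [if_neg hc, bLoop_acc, ih false, pvPT_cons,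
           show (if pyCleanLine raw = "" ∧ pvPT (pvF t) = [] then ([] : List String)
                 else pyCleanLine raw :: pvPT (pvF t)) = pyCleanLine raw :: pvPT (pvF t)
             from if_neg (fun hh => hc hh.1)]
        rw [show pvColl p (pyCleanLine raw :: pvPT (pvF t))
              = (if p then [""] else []) ++ pyCleanLine raw :: pvColl false (pvPT (pvF t)) by
            rw [pvColl]; simp [hc]]
        cases p <;> simp

lemma bLoop_false (t : List String) : ∀ p : Bool,
    bLoop t [] false p = (pvCzip "" (pvPT (pvF t))).map (fun l => " * " ++ l) := by
  induction t with
  | nil => intro p; simp [bLoop, pvF, pvPT, pvCzip]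
  | cons raw t ih =>
    intro p
    rw [bLoop]
    dsimp only
    by_cases h : raw = ""
    · rw [if_pos h, show pvF (raw :: t) = pvF t by simp [pvF, h]]
      exact ih p
    · rw [if_neg h, show pvF (raw :: t) = pyCleanLine raw :: pvF t by simp [pvF, h]]
      by_cases hc : pyCleanLine raw = ""
      · rw [if_pos hc, hc, pvPT_cons, ih true]
        by_cases he : pvPT (pvF t) = []
        · rw [if_pos ⟨rfl, he⟩, he]
        · rw [if_neg (by simp [he])]
          rw [show pvCzip "" ("" :: pvPT (pvF t)) = pvCzip "" (pvPT (pvF t)) by rw [pvCzip]; simp]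
      · rw [if_neg hc, bLoop_acc, bLoop_true t false, pvPT_cons,
           show (if pyCleanLine raw = "" ∧ pvPT (pvF t) = [] then ([] : List String)
                 else pyCleanLine raw :: pvPT (pvF t)) = pyCleanLine raw :: pvPT (pvF t)
             from if_neg (fun hh => hc hh.1)]
        rw [show pvCzip "" (pyCleanLine raw :: pvPT (pvF t))
              = pyCleanLine raw :: pvCzip (pyCleanLine raw) (pvPT (pvF t)) by
            rw [pvCzip]; simp [hc]]
        rw [(czip_coll (pvPT (pvF t)) (pvPT_noTrail (pvF t))).1 (pyCleanLine raw) hc]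
        simp

-- ===== VERDICT (by name: the statement is the Claim_ definition above) =====
theorem block_comment_py_spec : Claim_equal_block_comment_py := by
  intro s d _
  unfold Spec_block_comment_py block_comment_py block_comment_py_alt
  dsimp only
  rw [show ((PySem.Str.split? s "\n").getD []).filterMap
        (fun line => if line ≠ "" then some (PySem.Str.rstrip (pyCleanLine line)) else none)
      = pvF ((PySem.Str.split? s "\n").getD []) by
    unfold pvF
    apply List.filterMap_congr
    intro x _
    by_cases hx : x = "" <;> simp [hx, clean_rstrip]]
  rw [show (((pvF ((PySem.Str.split? s "\n").getD [])).reverse.dropWhile (fun l => l == "")).reverse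
      : List String) = pvPT (pvF ((PySem.Str.split? s "\n").getD [])) from rfl]
  rw [czip_zip _ "", czip_dropWhile]
  rw [bLoop_acc, bLoop_false]
  rfl
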